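-- pv_equiv track=rewrite | github.com/Cyh29hao/The-SJTU-Intelligent-Optoelectronic-Computing-Lab | app.py | _normalize_friend_links
-- ===== SOURCE A (Python) =====
-- DEFAULT_FRIEND_LINKS = [
--     {
--         'title': 'SJTU',
--         'caption': 'Shanghai Jiao Tong University',
--         'url': 'https://www.sjtu.edu.cn/',
--         'image_filename': 'sjtu_logo.png'
--     },
--     {
--         'title': 'ICISEE',
--         'caption': 'School of Integrated Circuits',
--         'url': 'https://icisee.sjtu.edu.cn/',
--         'image_filename': 'icisee.jpg'
--     },
--     {
--         'title': 'Contact Us',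
--         'caption': 'Email the lab',
--         'url': 'mailto:yitongchen@sjtu.edu.cn',
--         'image_filename': 'friend_link_mail.svg'
--     },
--     {
--         'title': 'GitHub',
--         'caption': 'Lab project repository',
--         'url': 'https://github.com/Cyh29hao/The-SJTU-Intelligent-Optoelectronic-Computing-Lab',
--         'image_filename': 'friend_link_github.svg'
--     }
-- ]
--
-- def _normalize_friend_links(items):
--     normalized = []
--     source_items = items if isinstance(items, list) else []
--     for index, default_item in enumerate(DEFAULT_FRIEND_LINKS):
--         current = source_items[index] if index < len(source_items) and isinstance(source_items[index], dict) else {}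
--         title_raw = current['title'] if 'title' in current else default_item['title']
--         caption_raw = current['caption'] if 'caption' in current else default_item['caption']
--         url_raw = current['url'] if 'url' in current else default_item['url']
--         image_raw = current['image_filename'] if 'image_filename' in current else default_item.get('image_filename', '')
--         normalized.append({
--             'title': (title_raw or '').strip(),
--             'caption': (caption_raw or '').strip(),
--             'url': (url_raw or '').strip(),
--             'image_filename': (image_raw or '').strip()
--         })
--     return normalized
-- ===== SOURCE B (Python) =====
-- DEFAULT_FRIEND_LINKS = [
--     {
--         'title': 'SJTU',
--         'caption': 'Shanghai Jiao Tong University',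
--         'url': 'https://www.sjtu.edu.cn/',
--         'image_filename': 'sjtu_logo.png'
--     },
--     {
--         'title': 'ICISEE',
--         'caption': 'School of Integrated Circuits',
--         'url': 'https://icisee.sjtu.edu.cn/',
--         'image_filename': 'icisee.jpg'
--     },
--     {
--         'title': 'Contact Us',
--         'caption': 'Email the lab',
--         'url': 'mailto:yitongchen@sjtu.edu.cn',
--         'image_filename': 'friend_link_mail.svg'
--     },
--     {
--         'title': 'GitHub',
--         'caption': 'Lab project repository',
--         'url': 'https://github.com/Cyh29hao/The-SJTU-Intelligent-Optoelectronic-Computing-Lab',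
--         'image_filename': 'friend_link_github.svg'
--     }
-- ]
--
-- _FIELDS = ('title', 'caption', 'url', 'image_filename')
--
--
-- def _normalize_friend_links(items):
--     # Column-major, two-stage: first build one cleaned column per field across all
--     # slots, then transpose the columns into the per-slot dicts.
--     source = items if isinstance(items, list) else []
--     n = len(DEFAULT_FRIEND_LINKS)
--     columns = {}
--     for field in _FIELDS:
--         col = []
--         for i in range(n):
--             cur = source[i] if i < len(source) and isinstance(source[i], dict) else {}
--             value = cur.get(field, DEFAULT_FRIEND_LINKS[i][field])
--             col.append((value or '').strip())
--         columns[field] = col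
--     return [{field: columns[field][i] for field in _FIELDS} for i in range(n)]
-- ===== Notes on version B (the rewrite author's own statement) =====
-- stated objective: alternative
-- what changed: B computes the result column-major in two stages - one pass per field building a cleaned column across all four slots into a dict of columns, then a transpose pass assembling each slot's dict from the columns - instead of A's single slot-major loop with four unrolled per-field conditionals.
import Mathlib
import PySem

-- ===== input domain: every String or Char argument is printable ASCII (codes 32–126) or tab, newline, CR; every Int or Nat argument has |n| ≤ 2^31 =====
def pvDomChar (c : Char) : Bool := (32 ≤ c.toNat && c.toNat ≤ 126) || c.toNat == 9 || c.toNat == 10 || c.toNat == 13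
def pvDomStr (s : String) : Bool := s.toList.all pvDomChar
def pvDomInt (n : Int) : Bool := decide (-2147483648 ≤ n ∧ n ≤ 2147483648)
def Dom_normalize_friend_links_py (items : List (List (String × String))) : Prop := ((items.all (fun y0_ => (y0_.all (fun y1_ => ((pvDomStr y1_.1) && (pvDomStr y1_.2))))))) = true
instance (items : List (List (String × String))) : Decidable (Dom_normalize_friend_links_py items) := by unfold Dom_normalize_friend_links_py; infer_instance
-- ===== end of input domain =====

-- B normalizes column-major in two stages (one cleaned column per field, then a
-- transpose into per-slot dicts) instead of A's single slot-major loop with four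
-- unrolled per-field conditionals; objective: alternative decomposition, same cost.

-- shared module constant DEFAULT_FRIEND_LINKS (each dict as an association list)
def pyDefaultFriendLinks : List (List (String × String)) :=
  [[("title", "SJTU"),
    ("caption", "Shanghai Jiao Tong University"),
    ("url", "https://www.sjtu.edu.cn/"),
    ("image_filename", "sjtu_logo.png")],
   [("title", "ICISEE"),
    ("caption", "School of Integrated Circuits"),
    ("url", "https://icisee.sjtu.edu.cn/"),
    ("image_filename", "icisee.jpg")],
   [("title", "Contact Us"),
    ("caption", "Email the lab"),
    ("url", "mailto:yitongchen@sjtu.edu.cn"),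
    ("image_filename", "friend_link_mail.svg")],
   [("title", "GitHub"),
    ("caption", "Lab project repository"),
    ("url", "https://github.com/Cyh29hao/The-SJTU-Intelligent-Optoelectronic-Computing-Lab"),
    ("image_filename", "friend_link_github.svg")]]

-- dict lookup on an association list: first match ('k in d' / 'd[k]' / 'd.get(k, dflt)')
def pyDictGet? (d : List (String × String)) (k : String) : Option String :=
  (d.find? (fun p => p.1 == k)).map (·.2)

-- ===== PORT A =====
-- A's loop body: four per-field "current[f] if f in current else default" fallbacks (ported as getD).
-- 'default_item[f]' never raises (every default entry carries all four keys); ported as getD "".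
def normalize_friend_links_py (items : List (List (String × String))) : List (List (String × String)) :=
  (PySem.List.enumerate pyDefaultFriendLinks).foldl
    (fun normalized p =>
      let index := p.1
      let default_item := p.2
      -- 'source_items[index] if index < len(source_items) and isinstance(..., dict) else {}'
      let current := (PySem.List.pyGet? items index).getD []
      let title_raw := (pyDictGet? current "title").getD ((pyDictGet? default_item "title").getD "")
      let caption_raw := (pyDictGet? current "caption").getD ((pyDictGet? default_item "caption").getD "")
      let url_raw := (pyDictGet? current "url").getD ((pyDictGet? default_item "url").getD "")
      let image_raw := (pyDictGet? current "image_filename").getD ((pyDictGet? default_item "image_filename").getD "")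
      -- '(x or "").strip()' on a string equals x.strip() ('' stays '')
      normalized ++ [[("title", PySem.Str.strip title_raw),
                      ("caption", PySem.Str.strip caption_raw),
                      ("url", PySem.Str.strip url_raw),
                      ("image_filename", PySem.Str.strip image_raw)]])
    []

-- ===== PORT B =====
def pyFields : List String := ["title", "caption", "url", "image_filename"]

def normalize_friend_links_py_alt (items : List (List (String × String))) : List (List (String × String)) :=
  -- n = len(DEFAULT_FRIEND_LINKS)
  let n : Int := pyDefaultFriendLinks.length
  -- stage 1: columns[field] = [cleaned value of 'field' for each slot i in range(n)]
  let columns : PySem.Dict String (List String) :=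
    pyFields.foldl
      (fun columns field =>
        let col :=
          (PySem.List.pyRange 0 n 1).foldl
            (fun col i =>
              -- 'source[i] if i < len(source) and isinstance(source[i], dict) else {}'
              let cur := (PySem.List.pyGet? items i).getD []
              -- 'cur.get(field, DEFAULT_FRIEND_LINKS[i][field])'; the defaults index/key never raise, ported as getD
              let value := (pyDictGet? cur field).getD
                ((pyDictGet? ((PySem.List.pyGet? pyDefaultFriendLinks i).getD []) field).getD "")
              col ++ [PySem.Str.strip value])
            []
        columns.insert field col)
      PySem.Dict.empty
  -- stage 2: transpose — row i takes columns[field][i] for each field ('columns[field][i]' never raises, ported as getD)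
  (PySem.List.pyRange 0 n 1).map
    (fun i => pyFields.map (fun field => (field, (PySem.List.pyGet? (columns.getD field []) i).getD "")))

-- ===== PRECONDITION & SPEC =====
def Spec_normalize_friend_links_py (items : List (List (String × String))) (out : List (List (String × String))) : Prop := out = normalize_friend_links_py_alt items
instance (items : List (List (String × String))) (out : List (List (String × String))) : Decidable (Spec_normalize_friend_links_py items out) := by unfold Spec_normalize_friend_links_py; infer_instance

-- ===== CLAIM (what is proved, stated in full; the proofs are below) =====
def Claim_equal_normalize_friend_links_py : Prop := ∀ (items : List (List (String × String))), Dom_normalize_friend_links_py items → Spec_normalize_friend_links_py items (normalize_friend_links_py items)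

-- ===== LEMMAS AND PROOFS =====
set_option maxHeartbeats 2000000 in
theorem normalize_friend_links_eq (items : List (List (String × String))) :
    normalize_friend_links_py items = normalize_friend_links_py_alt items := by
  match items with
  | [] => rfl
  | [_] => rfl
  | [_, _] => rfl
  | [_, _, _] => rfl
  | a :: b :: c :: d :: t =>
    have e0 : PySem.List.pyGet? (a :: b :: c :: d :: t) (0 : Int) = some a := by
      simpa using PySem.List.pyGet?_natCast (xs := a :: b :: c :: d :: t) (n := 0)
    have e1 : PySem.List.pyGet? (a :: b :: c :: d :: t) (1 : Int) = some b := by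
      simpa using PySem.List.pyGet?_natCast (xs := a :: b :: c :: d :: t) (n := 1)
    have e2 : PySem.List.pyGet? (a :: b :: c :: d :: t) (2 : Int) = some c := by
      simpa using PySem.List.pyGet?_natCast (xs := a :: b :: c :: d :: t) (n := 2)
    have e3 : PySem.List.pyGet? (a :: b :: c :: d :: t) (3 : Int) = some d := by
      simpa using PySem.List.pyGet?_natCast (xs := a :: b :: c :: d :: t) (n := 3)
    simp only [normalize_friend_links_py, normalize_friend_links_py_alt, pyDefaultFriendLinks,
      pyFields, PySem.List.enumerate_cons, PySem.List.enumerate_nil, List.foldl, List.map,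
      List.length, List.nil_append]
    simp [e0, e1, e2, e3, PySem.List.pyRange, List.range_succ, PySem.Dict.empty,
      PySem.Dict.insert, PySem.Dict.getD, PySem.Dict.get?]

-- ===== VERDICT (by name: the statement is the Claim_ definition above) =====
theorem normalize_friend_links_py_spec : Claim_equal_normalize_friend_links_py := by
  intro items _
  exact normalize_friend_links_eq items
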